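-- pv_equiv track=rewrite | github.com/pypi-data/pypi-mirror-348 | packages/schubertpy/schubertpy-1.0.5-py3-none-any.whl/schubertpy/partition.py | is_valid_part
-- ===== SOURCE A (Python) =====
-- from typing import List, Tuple
-- from typing import List
--
-- def _is_non_increasing(part: List[int]):
--     # Iterate through the list, comparing each element with the next one
--     for i in range(len(part) - 1):
--         # If the current element is smaller than the next one,
--         # the list is not in descending order
--         if part[i] < part[i + 1]:
--             return False
--     return True
--
-- def is_valid_part(part: List[int]) -> bool:
--     if not isinstance(part, list):
--         return False
--     if not all(isinstance(x, int) for x in part):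
--         return False
--     if not all(x >= 0 for x in part):
--         return False
--     if not _is_non_increasing(part):
--         return False
--     return True
-- ===== SOURCE B (Python) =====
-- def is_valid_part(part):
--     if not isinstance(part, list):
--         return False
--     if not all(isinstance(x, int) for x in part):
--         return False
--     s = sorted(part, reverse=True)
--     # a list is non-increasing iff it equals its own descending sort,
--     # and then all elements are >= 0 iff its minimum (the last of s) is.
--     return s == part and (not part or s[-1] >= 0)
-- ===== Notes on version B (the rewrite author's own statement) =====
-- stated objective: alternative
-- what changed: Instead of A's explicit adjacent-pair index loop plus a separate nonnegativity scan, B sorts the list in descending order and checks the list equals its own sort (non-increasing iff a fixed point of descending sort) and that the sort's last element (the minimum) is nonnegative; it trades A's O(n) scans for an O(n log n) sort-based characterisation.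
import Mathlib
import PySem

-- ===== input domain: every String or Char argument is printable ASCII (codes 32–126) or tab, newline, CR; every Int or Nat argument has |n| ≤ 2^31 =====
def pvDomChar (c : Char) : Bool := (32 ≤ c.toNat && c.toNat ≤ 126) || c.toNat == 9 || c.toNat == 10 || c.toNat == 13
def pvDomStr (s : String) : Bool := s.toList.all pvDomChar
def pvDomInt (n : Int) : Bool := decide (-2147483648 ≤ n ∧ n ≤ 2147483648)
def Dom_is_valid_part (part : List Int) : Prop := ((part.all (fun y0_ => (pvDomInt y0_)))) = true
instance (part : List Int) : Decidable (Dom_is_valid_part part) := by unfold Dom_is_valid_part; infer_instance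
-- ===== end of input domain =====

-- B replaces A's per-element scans by a sort-based characterisation: the list is valid
-- iff it is a fixed point of descending sort and the sort's minimum is nonnegative (objective: alternative).

-- ===== PORT A =====
-- helper `_is_non_increasing`: index loop over range(len(part)-1); indices are in range,
-- so getD transcribes part[i] exactly here.
def pv_is_non_increasing (part : List Int) : Bool :=
  (List.range (part.length - 1)).all (fun i => !(part.getD i 0 < part.getD (i + 1) 0))

-- the two isinstance checks are identically true under the type convention (List Int)
def is_valid_part (part : List Int) : Bool :=
  if !(part.all (fun _ => true)) then false
  else if !(part.all (fun x => decide (x ≥ 0))) then false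
  else if !(pv_is_non_increasing part) then false
  else true

-- ===== PORT B =====
-- s = sorted(part, reverse=True); result: s == part and (not part or s[-1] >= 0)
-- s[-1] ported with pyGet? (-1); the short-circuit `not part or …` keeps it off the empty list.
def is_valid_part_alt (part : List Int) : Bool :=
  let s := PySem.List.sorted part (fun x => x) true
  (s == part) &&
    (part.isEmpty ||
      (match PySem.List.pyGet? s (-1) with
       | some v => decide (v ≥ 0)
       | none => false))

-- ===== PRECONDITION & SPEC =====
def Spec_is_valid_part (part : List Int) (out : Bool) : Prop := out = is_valid_part_alt part
instance (part : List Int) (out : Bool) : Decidable (Spec_is_valid_part part out) := by unfold Spec_is_valid_part; infer_instance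

-- ===== CLAIM (what is proved, stated in full; the proofs are below) =====
def Claim_equal_is_valid_part : Prop := ∀ (part : List Int), Dom_is_valid_part part → Spec_is_valid_part part (is_valid_part part)

-- ===== LEMMAS AND PROOFS =====

-- A's index loop says exactly: adjacent pairs are non-increasing
theorem pv_nonincr_eq_chain (part : List Int) :
    pv_is_non_increasing part = true ↔ List.IsChain (· ≥ ·) part := by
  induction part with
  | nil => simp [pv_is_non_increasing]
  | cons a t ih =>
    cases t with
    | nil => simp [pv_is_non_increasing]
    | cons b u =>
      simp only [pv_is_non_increasing, List.length_cons, Nat.add_sub_cancel] at *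
      rw [List.range_succ_eq_map]
      simp only [List.all_cons, List.all_map, Function.comp_def]
      rw [List.isChain_cons_cons]
      constructor
      · intro h
        have h1 : ¬ a < b := by simpa using (Bool.and_elim_left h)
        have h2 := Bool.and_elim_right h
        exact ⟨by omega, ih.mp (by simpa [Nat.succ_eq_add_one] using h2)⟩
      · rintro ⟨hba, hrest⟩
        have := ih.mpr hrest
        simp only [Nat.succ_eq_add_one, List.getD_cons_succ, List.getD_cons_zero] at *
        rw [Bool.and_eq_true]
        exact ⟨by simp; omega, by simpa using this⟩

-- the list is non-increasing iff it is a fixed point of descending sort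
theorem pv_sorted_fix_iff (part : List Int) :
    (PySem.List.sorted part (fun x => x) true = part) ↔ List.IsChain (· ≥ ·) part := by
  constructor
  · intro h
    have hp := PySem.List.sorted_pairwise_rev (xs := part) (key := fun x => x)
    rw [h] at hp
    exact (List.isChain_iff_pairwise).mpr (hp.imp (fun h => h))
  · intro h
    exact PySem.List.sorted_rev_eq_self_of_pairwise part (fun x => x)
      (((List.isChain_iff_pairwise).mp h).imp (fun h => h))

-- on a non-increasing list, the last element bounds every element from below
theorem pv_last_min : ∀ (part : List Int), List.Pairwise (· ≥ ·) part →
    ∀ x ∈ part, ∀ l, part.getLast? = some l → l ≤ x := by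
  intro part
  induction part with
  | nil => intro _ x hx; exact absurd hx (List.not_mem_nil)
  | cons a t ih =>
    intro hp x hx l hl
    rcases List.pairwise_cons.mp hp with ⟨ha, ht⟩
    cases t with
    | nil =>
      simp at hl hx; omega
    | cons b u =>
      rw [List.getLast?_cons_cons] at hl
      have hlmem : l ∈ b :: u := List.mem_of_getLast? hl
      rcases List.mem_cons.mp hx with rfl | hx'
      · exact ha l hlmem
      · exact ih ht x hx' l hl

-- ===== VERDICT (by name: the statement is the Claim_ definition above) =====
theorem is_valid_part_spec : Claim_equal_is_valid_part := by
  intro part _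
  unfold Spec_is_valid_part is_valid_part is_valid_part_alt
  simp only [List.all_eq_true, implies_true, not_true_eq_false, Bool.not_true, Bool.false_eq_true,
    if_false]
  by_cases hc : List.IsChain (· ≥ ·) part
  · have hs : PySem.List.sorted part (fun x => x) true = part := (pv_sorted_fix_iff part).mpr hc
    have hni : pv_is_non_increasing part = true := (pv_nonincr_eq_chain part).mpr hc
    have hp : List.Pairwise (· ≥ ·) part := (List.isChain_iff_pairwise).mp hc
    simp only [hs, hni, Bool.not_true]
    cases part with
    | nil => simp
    | cons a t =>
      obtain ⟨l, hl⟩ : ∃ l, (a :: t).getLast? = some l :=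
        ⟨(a :: t).getLast (by simp), List.getLast?_eq_some_getLast (by simp)⟩
      rw [PySem.List.pyGet?_neg_one, hl]
      have hlmem : l ∈ a :: t := List.mem_of_getLast? hl
      by_cases h0 : (0 : Int) ≤ l
      · have hall : ∀ x ∈ (a :: t), x ≥ 0 :=
          fun x hx => le_trans h0 (pv_last_min (a :: t) hp x hx l hl)
        have h0a : (0 : Int) ≤ a := hall a (by simp)
        have h0t : ∀ x ∈ t, (0 : Int) ≤ x := fun x hx => hall x (List.mem_cons_of_mem a hx)
        simp [h0a, h0]
        exact h0t
      · have hnall : ¬ ∀ x ∈ (a :: t), x ≥ 0 := fun hall => h0 (hall l hlmem)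
        simp [h0]
        intro ha
        rcases List.mem_cons.mp hlmem with rfl | hl'
        · omega
        · exact ⟨l, hl', by omega⟩
  · have hs : PySem.List.sorted part (fun x => x) true ≠ part :=
      fun h => hc ((pv_sorted_fix_iff part).mp h)
    have hni : pv_is_non_increasing part = false := by
      cases h : pv_is_non_increasing part
      · rfl
      · exact absurd ((pv_nonincr_eq_chain part).mp h) hc
    simp [hs, hni]
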